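-- pv_equiv track=rewrite | github.com/wenima/hackerrank | WeekOfCode32/src/kill_max_monsters.py | getMaxMonsters
-- ===== SOURCE A (Python) =====
-- from functools import lru_cache
--
-- def getMaxMonsters(no_of_monsters, dmg, time, monsters):
--     """
--     Solve a variation of the 0/1 knapsack problem by finding the
--     subsequence of 'monsters' that can be killed within a given 'time'.
--
--     `monsters` is a sequence of non-negative integers representing hit points.
--
--     `dmg` is a non-negative integer representing the dmg output of our weapon per second.
--
--     Return a number representing how many monsters can be killed.
--
--     >>> monsters = [16, 19, 7, 11, 23, 8, 16]
--     >>> kill_max_monsters_in_given_time(monsters, 8, 6)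
--     4
--     """
--     """
--     Solve a variation of the 0/1 knapsack problem by finding the
--     subsequence of 'monsters' that can be killed within a given 'time'.
--
--     `monsters` is a sequence of non-negative integers representing hit points.
--
--     `dmg` is a non-negative integer representing the dmg output of our weapon per second.
--
--     Return a number representing how many monsters can be killed.
--
--     >>> monsters = [16, 19, 7, 11, 23, 8, 16]
--     >>> getMaxMonsters(monsters, 8, 6)
--     4
--     """
--
--     @lru_cache(maxsize=128, typed=False)
--     def bestvalue(i, j):
--         if i == 0: return 0
--         weight = monsters[i - 1]
--         if weight > j:
--             return bestvalue(i - 1, j)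
--         else:
--             return max(bestvalue(i - 1, j),
--                        bestvalue(i - 1, j - weight) + 1)
--
--     dmg_out = dmg * time
--     j = dmg_out
--     result = []
--     for i in range(len(monsters), 0, -1):
--         if bestvalue(i, j) != bestvalue(i - 1, j):
--             result.append(monsters[i - 1])
--             j -= monsters[i - 1]
--     result.reverse()
--     killed, monsters = bestvalue(len(monsters), dmg_out), result
--     return killed
-- ===== SOURCE B (Python) =====
-- def getMaxMonsters(no_of_monsters, dmg, time, monsters):
--     """Iterative replacement for the memoized recursion: walk the monsters
--     from the last one to the first, keeping a dict that maps each reachable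
--     remaining damage budget to the most kills achieved on a path reaching it;
--     the answer is the best kill count among the final states."""
--     states = {dmg * time: 0}
--     for hp in reversed(monsters):
--         nxt = {}
--         for j, c in states.items():
--             # option 1: skip this monster
--             if nxt.get(j, -1) < c:
--                 nxt[j] = c
--             # option 2: kill it, if its hit points fit the remaining budget
--             if hp <= j and nxt.get(j - hp, -1) < c + 1:
--                 nxt[j - hp] = c + 1
--         states = nxt
--     return max(states.values())
-- ===== Notes on version B (the rewrite author's own statement) =====
-- stated objective: faster
-- what changed: The lru_cache(128)-memoized top-down recursion over (index, budget) plus a dead reconstruction loop is replaced by a single forward pass that walks the monsters once, maintaining a dict from each reachable remaining budget to the best kill count, and returns the max over the final states.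
import Mathlib
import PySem

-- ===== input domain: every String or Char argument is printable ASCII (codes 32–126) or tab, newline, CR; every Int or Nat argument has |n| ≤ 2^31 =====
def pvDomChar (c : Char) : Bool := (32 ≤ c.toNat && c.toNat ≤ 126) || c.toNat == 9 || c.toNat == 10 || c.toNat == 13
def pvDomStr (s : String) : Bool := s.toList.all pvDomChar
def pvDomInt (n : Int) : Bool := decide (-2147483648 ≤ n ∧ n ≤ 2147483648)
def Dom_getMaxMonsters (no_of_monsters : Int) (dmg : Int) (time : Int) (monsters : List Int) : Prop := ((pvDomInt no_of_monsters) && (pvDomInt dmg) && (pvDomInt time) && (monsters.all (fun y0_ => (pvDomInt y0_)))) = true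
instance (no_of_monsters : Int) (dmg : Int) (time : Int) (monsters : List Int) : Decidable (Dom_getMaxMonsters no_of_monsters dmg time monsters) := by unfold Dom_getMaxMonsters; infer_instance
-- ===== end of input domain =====

-- B replaces A's lru_cache(128)-memoized recursion over (index, budget) (plus A's reconstruction
-- loop, whose result is discarded) by one forward pass keeping a dict from each reachable
-- remaining budget to the best kill count; the return value is proved identical on every input.


-- ===== PORT A =====
-- bestvalue(i, j): recursion on i; at every call A makes, 1 ≤ i ≤ len(monsters), so the
-- index i - 1 is in range and the .getD 0 default of pyGet? is never taken
def bestvalueA (monsters : List Int) : Nat → Int → Int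
  | 0, _ => 0
  | i + 1, j =>
    let weight := (PySem.List.pyGet? monsters (i : Int)).getD 0
    if weight > j then bestvalueA monsters i j
    else max (bestvalueA monsters i j) (bestvalueA monsters i (j - weight) + 1)

-- the reconstruction loop over range(len(monsters), 0, -1) builds (j, result); Python rebinds
-- `monsters` to the reversed result but returns only `killed`, so that state is dead for the
-- returned value; it is kept for fidelity
def getMaxMonsters (no_of_monsters : Int) (dmg : Int) (time : Int) (monsters : List Int) : Int :=
  let dmg_out := dmg * time
  let final := (PySem.List.pyRange (monsters.length : Int) 0 (-1)).foldl
      (fun (s : Int × List Int) i =>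
        if bestvalueA monsters i.toNat s.1 ≠ bestvalueA monsters (i.toNat - 1) s.1 then
          (s.1 - (PySem.List.pyGet? monsters (i - 1)).getD 0,
           s.2 ++ [(PySem.List.pyGet? monsters (i - 1)).getD 0])
        else s)
      (dmg_out, ([] : List Int))
  let _result := final.2.reverse
  bestvalueA monsters monsters.length dmg_out

-- ===== PORT B =====
-- one inner-loop body of B: the two conditional max-updates for the entry (j, c) = e
def stepEntry (hp : Int) (nxt : PySem.Dict Int Int) (e : Int × Int) : PySem.Dict Int Int :=
  let nxt1 := if nxt.getD e.1 (-1) < e.2 then nxt.insert e.1 e.2 else nxt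
  if hp ≤ e.1 ∧ nxt1.getD (e.1 - hp) (-1) < e.2 + 1 then nxt1.insert (e.1 - hp) (e.2 + 1)
  else nxt1

-- one outer-loop step of B: rebuild the state dict for the next monster
def stepDict (hp : Int) (states : PySem.Dict Int Int) : PySem.Dict Int Int :=
  states.items.foldl (stepEntry hp) PySem.Dict.empty

-- max(states.values()): states is never empty (proved below as outer_ne_nil), so max? is
-- some and the .getD 0 default is never taken
def getMaxMonsters_alt (no_of_monsters : Int) (dmg : Int) (time : Int) (monsters : List Int) : Int :=
  let states : PySem.Dict Int Int := PySem.Dict.ofList [(dmg * time, 0)]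
  let states := monsters.reverse.foldl (fun d hp => stepDict hp d) states
  (PySem.List.max? states.values (fun y => y)).getD 0

-- ===== PRECONDITION & SPEC =====
def Spec_getMaxMonsters (no_of_monsters : Int) (dmg : Int) (time : Int) (monsters : List Int) (out : Int) : Prop := out = getMaxMonsters_alt no_of_monsters dmg time monsters
instance (no_of_monsters : Int) (dmg : Int) (time : Int) (monsters : List Int) (out : Int) : Decidable (Spec_getMaxMonsters no_of_monsters dmg time monsters out) := by unfold Spec_getMaxMonsters; infer_instance

-- ===== CLAIM (what is proved, stated in full; the proofs are below) =====
def Claim_equal_getMaxMonsters : Prop := ∀ (no_of_monsters : Int) (dmg : Int) (time : Int) (monsters : List Int), Dom_getMaxMonsters no_of_monsters dmg time monsters → Spec_getMaxMonsters no_of_monsters dmg time monsters (getMaxMonsters no_of_monsters dmg time monsters)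

-- ===== LEMMAS AND PROOFS =====

-- the underlying knapsack value as a recursion on a plain list: A consumes monsters from the
-- back, so A's bestvalue(i, j) is bestL over the reversed i-prefix; B's dict pass computes the
-- same bestL, via the entry-max invariant entM below
def bestL : List Int → Int → Int
  | [], _ => 0
  | w :: t, j => if w > j then bestL t j else max (bestL t j) (bestL t (j - w) + 1)

theorem bestL_nonneg (l : List Int) (j : Int) : 0 ≤ bestL l j := by
  induction l generalizing j with
  | nil => simp [bestL]
  | cons w t ih => simp only [bestL]; split <;> simp [ih]

def entM (f : Int → Int) (d : PySem.Dict Int Int) : Int :=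
  (d.items.map (fun p => p.2 + f p.1)).foldl max 0

theorem foldl_max_le {xs : List Int} {a m : Int} (ha : a ≤ m) (h : ∀ x ∈ xs, x ≤ m) :
    xs.foldl max a ≤ m := by
  induction xs generalizing a with
  | nil => simpa using ha
  | cons x t ih =>
    simp only [List.foldl_cons]
    exact ih (max_le ha (h x (by simp))) (fun y hy => h y (by simp [hy]))

theorem entM_nonneg (f : Int → Int) (d : PySem.Dict Int Int) : 0 ≤ entM f d :=
  (PySem.List.le_foldl_max _ 0).1

theorem le_entM_of_mem {f : Int → Int} {d : PySem.Dict Int Int} {p : Int × Int}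
    (h : p ∈ d.items) : p.2 + f p.1 ≤ entM f d :=
  (PySem.List.le_foldl_max _ 0).2 _ (List.mem_map_of_mem h)

theorem entM_le {f : Int → Int} {d : PySem.Dict Int Int} {m : Int} (hm : 0 ≤ m)
    (h : ∀ p ∈ d.items, p.2 + f p.1 ≤ m) : entM f d ≤ m := by
  refine foldl_max_le hm ?_
  intro x hx
  obtain ⟨p, hp, rfl⟩ := List.mem_map.mp hx
  exact h p hp

theorem entM_insert (f : Int → Int) (d : PySem.Dict Int Int) (k v : Int)
    (hge : ∀ v', (k, v') ∈ d.items → v' ≤ v) :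
    entM f (d.insert k v) = max (entM f d) (v + f k) := by
  apply le_antisymm
  · refine entM_le (le_max_of_le_left (entM_nonneg f d)) ?_
    intro p hp
    rcases (PySem.Dict.mem_items_insert d k v p).mp hp with rfl | ⟨hmem, _⟩
    · exact le_max_right _ _
    · exact le_max_of_le_left (le_entM_of_mem hmem)
  · refine max_le (entM_le (entM_nonneg _ _) ?_) (le_entM_of_mem (PySem.Dict.mem_items_insert_self d k v))
    intro p hp
    by_cases hk : p.1 = k
    · have hv' : p.2 ≤ v := hge p.2 (by rw [← hk]; exact hp)
      calc p.2 + f p.1 ≤ v + f k := by rw [hk]; omega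
        _ ≤ _ := le_entM_of_mem (PySem.Dict.mem_items_insert_self d k v)
    · exact le_entM_of_mem ((PySem.Dict.mem_items_insert d k v p).mpr (Or.inr ⟨hp, hk⟩))

theorem entM_gupd (f : Int → Int) (d : PySem.Dict Int Int) (k v : Int)
    (hv : 0 ≤ v) (hnd : d.keys.Nodup) :
    entM f (if d.getD k (-1) < v then d.insert k v else d) = max (entM f d) (v + f k) := by
  split_ifs with hlt
  · refine entM_insert f d k v ?_
    intro v' hmem
    have := PySem.Dict.getD_of_mem_items d hmem hnd (-1)
    omega
  · -- the key is present with a value ≥ v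
    rw [PySem.Dict.getD_eq_get?_getD] at hlt
    cases hget : d.get? k with
    | none => rw [hget] at hlt; simp at hlt; omega
    | some v0 =>
      rw [hget] at hlt; simp at hlt
      have hmem := PySem.Dict.mem_items_of_get?_eq_some d hget
      have h1 : v + f k ≤ v0 + f k := by omega
      have h2 : v0 + f k ≤ entM f d := le_entM_of_mem hmem
      omega

theorem nodup_gupd (d : PySem.Dict Int Int) (k v : Int) (hnd : d.keys.Nodup) :
    (if d.getD k (-1) < v then d.insert k v else d).keys.Nodup := by
  split_ifs
  · exact PySem.Dict.nodup_keys_insert d k v hnd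
  · exact hnd

theorem nodup_stepEntry (hp : Int) (nxt : PySem.Dict Int Int) (e : Int × Int)
    (hnd : nxt.keys.Nodup) : (stepEntry hp nxt e).keys.Nodup := by
  simp only [stepEntry]
  have h1 := nodup_gupd nxt e.1 e.2 hnd
  set nxt1 := if nxt.getD e.1 (-1) < e.2 then nxt.insert e.1 e.2 else nxt with hn1
  split_ifs
  · exact PySem.Dict.nodup_keys_insert nxt1 _ _ h1
  · exact h1

theorem vals_gupd (d : PySem.Dict Int Int) (k v : Int) (hv : 0 ≤ v)
    (hvals : ∀ p ∈ d.items, 0 ≤ p.2) :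
    ∀ p ∈ (if d.getD k (-1) < v then d.insert k v else d).items, 0 ≤ p.2 := by
  split_ifs
  · intro p hp
    rcases (PySem.Dict.mem_items_insert d k v p).mp hp with rfl | ⟨hmem, _⟩
    · exact hv
    · exact hvals p hmem
  · exact hvals

theorem vals_stepEntry (hp : Int) (nxt : PySem.Dict Int Int) (e : Int × Int)
    (he : 0 ≤ e.2) (hvals : ∀ p ∈ nxt.items, 0 ≤ p.2) :
    ∀ p ∈ (stepEntry hp nxt e).items, 0 ≤ p.2 := by
  simp only [stepEntry]
  have h1 := vals_gupd nxt e.1 e.2 he hvals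
  set nxt1 := if nxt.getD e.1 (-1) < e.2 then nxt.insert e.1 e.2 else nxt with hn1
  split_ifs
  · intro p hp
    rcases (PySem.Dict.mem_items_insert nxt1 _ _ p).mp hp with rfl | ⟨hmem, _⟩
    · omega
    · exact h1 p hmem
  · exact h1

theorem entM_stepEntry (t : List Int) (hp : Int) (nxt : PySem.Dict Int Int) (e : Int × Int)
    (he : 0 ≤ e.2) (hnd : nxt.keys.Nodup) :
    entM (bestL t) (stepEntry hp nxt e) =
      max (entM (bestL t) nxt) (e.2 + bestL (hp :: t) e.1) := by
  simp only [stepEntry]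
  have h1 := entM_gupd (bestL t) nxt e.1 e.2 he hnd
  have hnd1 := nodup_gupd nxt e.1 e.2 hnd
  set nxt1 := if nxt.getD e.1 (-1) < e.2 then nxt.insert e.1 e.2 else nxt with hn1
  by_cases hle : hp ≤ e.1
  · have hcond : (hp ≤ e.1 ∧ nxt1.getD (e.1 - hp) (-1) < e.2 + 1) ↔
        (nxt1.getD (e.1 - hp) (-1) < e.2 + 1) := by tauto
    rw [if_congr hcond rfl rfl]
    have h2 := entM_gupd (bestL t) nxt1 (e.1 - hp) (e.2 + 1) (by omega) hnd1
    rw [h2, h1]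
    have hb : bestL (hp :: t) e.1 = max (bestL t e.1) (bestL t (e.1 - hp) + 1) := by
      simp [bestL, not_lt.mpr hle]
    rw [hb]
    omega
  · have hcond : ¬ (hp ≤ e.1 ∧ nxt1.getD (e.1 - hp) (-1) < e.2 + 1) := by tauto
    rw [if_neg hcond, h1]
    have hb : bestL (hp :: t) e.1 = bestL t e.1 := by
      simp [bestL, lt_of_not_ge hle]
    rw [hb]

theorem vals_foldl_stepEntry (hp : Int) (es : List (Int × Int)) (d0 : PySem.Dict Int Int)
    (hes : ∀ p ∈ es, 0 ≤ p.2) (hvals : ∀ p ∈ d0.items, 0 ≤ p.2) :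
    ∀ p ∈ (es.foldl (stepEntry hp) d0).items, 0 ≤ p.2 := by
  induction es generalizing d0 with
  | nil => exact hvals
  | cons e es ih =>
    exact ih _ (fun p hp' => hes p (by simp [hp']))
      (vals_stepEntry hp d0 e (hes e (by simp)) hvals)

theorem entM_foldl_stepEntry (t : List Int) (hp : Int) (es : List (Int × Int))
    (d0 : PySem.Dict Int Int) (hnd : d0.keys.Nodup) (hes : ∀ p ∈ es, 0 ≤ p.2) :
    entM (bestL t) (es.foldl (stepEntry hp) d0) =
      (es.map (fun p => p.2 + bestL (hp :: t) p.1)).foldl max (entM (bestL t) d0) := by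
  induction es generalizing d0 with
  | nil => rfl
  | cons e es ih =>
    simp only [List.foldl_cons, List.map_cons]
    rw [ih _ (nodup_stepEntry hp d0 e hnd) (fun p hp' => hes p (by simp [hp'])),
      entM_stepEntry t hp d0 e (hes e (by simp)) hnd]

theorem entM_stepDict (t : List Int) (hp : Int) (d : PySem.Dict Int Int)
    (hvals : ∀ p ∈ d.items, 0 ≤ p.2) :
    entM (bestL t) (stepDict hp d) = entM (bestL (hp :: t)) d := by
  unfold stepDict
  rw [entM_foldl_stepEntry t hp d.items PySem.Dict.empty (by simp) hvals]
  have : entM (bestL t) (PySem.Dict.empty : PySem.Dict Int Int) = 0 := rfl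
  rw [this]
  rfl

theorem vals_stepDict (hp : Int) (d : PySem.Dict Int Int)
    (hvals : ∀ p ∈ d.items, 0 ≤ p.2) : ∀ p ∈ (stepDict hp d).items, 0 ≤ p.2 :=
  vals_foldl_stepEntry hp d.items _ hvals (by simp [PySem.Dict.empty])

theorem entM_outer (l : List Int) (d : PySem.Dict Int Int)
    (hvals : ∀ p ∈ d.items, 0 ≤ p.2) :
    entM (bestL []) (l.foldl (fun d hp => stepDict hp d) d) = entM (bestL l) d := by
  induction l generalizing d with
  | nil => rfl
  | cons hp t ih =>
    simp only [List.foldl_cons]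
    rw [ih _ (vals_stepDict hp d hvals)]
    exact entM_stepDict t hp d hvals

theorem items_insert_ne_nil (d : PySem.Dict Int Int) (k v : Int) :
    (d.insert k v).items ≠ [] := by
  intro h
  have := PySem.Dict.mem_items_insert_self d k v
  simp [h] at this

theorem stepEntry_ne_nil (hp : Int) (nxt : PySem.Dict Int Int) (e : Int × Int)
    (he : 0 ≤ e.2) : (stepEntry hp nxt e).items ≠ [] := by
  simp only [stepEntry]
  split_ifs with h1 h2 h3
  · exact items_insert_ne_nil _ _ _
  · exact items_insert_ne_nil _ _ _
  · exact items_insert_ne_nil _ _ _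
  · -- neither guard fired: the key e.1 is present, so nxt is nonempty
    rw [PySem.Dict.getD_eq_get?_getD] at h1
    cases hget : nxt.get? e.1 with
    | none => rw [hget] at h1; simp at h1; omega
    | some v0 =>
      have hmem := PySem.Dict.mem_items_of_get?_eq_some nxt hget
      intro h; simp [h] at hmem

theorem stepEntry_ne_nil' (hp : Int) (nxt : PySem.Dict Int Int) (e : Int × Int)
    (h : nxt.items ≠ []) : (stepEntry hp nxt e).items ≠ [] := by
  simp only [stepEntry]
  split_ifs
  · exact items_insert_ne_nil _ _ _
  · exact items_insert_ne_nil _ _ _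
  · exact items_insert_ne_nil _ _ _
  · exact h

theorem foldl_stepEntry_ne_nil (hp : Int) (es : List (Int × Int))
    (d0 : PySem.Dict Int Int) (h : d0.items ≠ []) :
    (es.foldl (stepEntry hp) d0).items ≠ [] := by
  induction es generalizing d0 with
  | nil => exact h
  | cons e es ih => exact ih _ (stepEntry_ne_nil' hp d0 e h)

theorem stepDict_ne_nil (hp : Int) (d : PySem.Dict Int Int)
    (h : d.items ≠ []) (hvals : ∀ p ∈ d.items, 0 ≤ p.2) :
    (stepDict hp d).items ≠ [] := by
  unfold stepDict
  obtain ⟨e, es, hes⟩ := List.exists_cons_of_ne_nil h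
  have he : 0 ≤ e.2 := hvals e (by simp [hes])
  rw [hes]
  simp only [List.foldl_cons]
  exact foldl_stepEntry_ne_nil hp es _ (stepEntry_ne_nil hp _ e he)

theorem outer_ne_nil (l : List Int) (d : PySem.Dict Int Int)
    (h : d.items ≠ []) (hvals : ∀ p ∈ d.items, 0 ≤ p.2) :
    (l.foldl (fun d hp => stepDict hp d) d).items ≠ [] := by
  induction l generalizing d with
  | nil => exact h
  | cons hp t ih =>
    simp only [List.foldl_cons]
    exact ih _ (stepDict_ne_nil hp d h hvals) (vals_stepDict hp d hvals)

theorem vals_outer (l : List Int) (d : PySem.Dict Int Int)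
    (hvals : ∀ p ∈ d.items, 0 ≤ p.2) :
    ∀ p ∈ (l.foldl (fun d hp => stepDict hp d) d).items, 0 ≤ p.2 := by
  induction l generalizing d with
  | nil => exact hvals
  | cons hp t ih =>
    simp only [List.foldl_cons]
    exact ih _ (vals_stepDict hp d hvals)

theorem bestvalueA_eq_bestL (monsters : List Int) :
    ∀ i, i ≤ monsters.length → ∀ j,
      bestvalueA monsters i j = bestL ((monsters.take i).reverse) j := by
  intro i
  induction i with
  | zero => simp [bestvalueA, bestL]
  | succ i ih =>
    intro h j
    have hi : i < monsters.length := h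
    have hw : (PySem.List.pyGet? monsters (i : Int)).getD 0 = monsters[i] := by
      simp [PySem.List.pyGet?, PySem.List.pyIdx?, hi]
    have ht : (monsters.take (i + 1)).reverse = monsters[i] :: (monsters.take i).reverse := by
      rw [List.take_add_one]
      simp [List.getElem?_eq_getElem hi]
    rw [ht]
    simp only [bestvalueA, bestL, hw, ih (Nat.le_of_lt hi)]

theorem max_values_eq_entM (d : PySem.Dict Int Int) (hne : d.items ≠ [])
    (hvals : ∀ p ∈ d.items, 0 ≤ p.2) :
    (PySem.List.max? d.values (fun y => y)).getD 0 = entM (bestL []) d := by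
  obtain ⟨e, es, hes⟩ := List.exists_cons_of_ne_nil hne
  have hv : d.values = e.2 :: es.map (·.2) := by
    show d.items.map (·.2) = _
    rw [hes]; rfl
  rw [hv, PySem.List.max?_id_cons, Option.getD_some]
  unfold entM
  rw [hes]
  simp only [List.map_cons, List.foldl_cons]
  have he : max 0 (e.2 + bestL [] e.1) = e.2 := by
    have := hvals e (by simp [hes]); simp only [bestL]; omega
  rw [he]
  congr 1
  exact List.map_congr_left (fun p _ => by simp [bestL])

theorem alt_eq_bestL (no_of_monsters dmg time : Int) (monsters : List Int) :
    getMaxMonsters_alt no_of_monsters dmg time monsters = bestL monsters.reverse (dmg * time) := by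
  have hd0 : (PySem.Dict.ofList [(dmg * time, (0 : Int))]).items = [(dmg * time, 0)] := rfl
  have hvals : ∀ p ∈ (PySem.Dict.ofList [(dmg * time, (0 : Int))]).items, 0 ≤ p.2 := by
    rw [hd0]; rintro p hp; simp at hp; subst hp; simp
  have hne : (PySem.Dict.ofList [(dmg * time, (0 : Int))]).items ≠ [] := by rw [hd0]; simp
  show (PySem.List.max? (monsters.reverse.foldl (fun d hp => stepDict hp d)
      (PySem.Dict.ofList [(dmg * time, 0)])).values (fun y => y)).getD 0 = _
  rw [max_values_eq_entM _ (outer_ne_nil _ _ hne hvals) (vals_outer _ _ hvals),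
    entM_outer _ _ hvals]
  unfold entM
  rw [hd0]
  simp only [List.map_cons, List.map_nil, List.foldl_cons, List.foldl_nil, zero_add]
  have := bestL_nonneg monsters.reverse (dmg * time)
  omega

theorem A_eq_bestL (no_of_monsters dmg time : Int) (monsters : List Int) :
    getMaxMonsters no_of_monsters dmg time monsters = bestL monsters.reverse (dmg * time) := by
  show bestvalueA monsters monsters.length (dmg * time) = _
  rw [bestvalueA_eq_bestL monsters monsters.length (le_refl _), List.take_length]

-- ===== VERDICT (by name: the statement is the Claim_ definition above) =====
theorem getMaxMonsters_spec : Claim_equal_getMaxMonsters := by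
  intro no_of_monsters dmg time monsters _
  show getMaxMonsters no_of_monsters dmg time monsters =
    getMaxMonsters_alt no_of_monsters dmg time monsters
  rw [A_eq_bestL, alt_eq_bestL]
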